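-- pv_equiv track=rewrite | github.com/domgalati/mortician | mortician/bundle.py | _parse_resolution_subsections
-- ===== SOURCE A (Python) =====
-- from typing import Any, Dict, List, Optional, Tuple
--
-- SUB_TEMP = "Temporary"
--
-- SUB_PERM = "Permanent"
--
-- def _parse_h3_subsection(body: str, subtitle: str) -> str:
--     """Extract ### subtitle body until next ### heading or EOF."""
--     if not body.strip():
--         return ""
--     lines = body.splitlines()
--     target = f"### {subtitle}"
--     start = None
--     for i, line in enumerate(lines):
--         if line.strip() == target:
--             start = i + 1
--             break
--     if start is None:
--         return ""
--     out: List[str] = []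
--     for line in lines[start:]:
--         if line.startswith("### "):
--             break
--         out.append(line)
--     return "\n".join(out).strip()
--
-- def _parse_resolution_subsection(resolution_body: str, sub: str) -> str:
--     return _parse_h3_subsection(resolution_body, sub)
--
-- def _parse_resolution_subsections(resolution_body: str) -> Tuple[str, str]:
--     # Determine whether the headings exist; we only apply the legacy
--     # fallback when *neither* "### Temporary" nor "### Permanent" is present.
--     lines = resolution_body.splitlines()
--     has_temp = any(line.strip() == f"### {SUB_TEMP}" for line in lines)
--     has_perm = any(line.strip() == f"### {SUB_PERM}" for line in lines)
--
--     t = _parse_resolution_subsection(resolution_body, SUB_TEMP)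
--     p = _parse_resolution_subsection(resolution_body, SUB_PERM)
--
--     if not has_temp and not has_perm and resolution_body.strip():
--         # No ### subsections at all: treat whole block as temporary (legacy).
--         return resolution_body.strip(), ""
--
--     # Headings exist (even if their bodies are empty): keep them empty.
--     return t, p
-- ===== SOURCE B (Python) =====
-- def _parse_resolution_subsections(resolution_body):
--     """Single pass over the lines: per-target state machines (found/open/acc)."""
--     T_TARGET = "### Temporary"
--     P_TARGET = "### Permanent"
--     t_found = t_open = p_found = p_open = False
--     t_acc = []
--     p_acc = []
--     for line in resolution_body.splitlines():
--         s = line.strip()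
--         if not t_found and s == T_TARGET:
--             t_found = t_open = True
--         elif t_open:
--             if line.startswith("### "):
--                 t_open = False
--             else:
--                 t_acc.append(line)
--         if not p_found and s == P_TARGET:
--             p_found = p_open = True
--         elif p_open:
--             if line.startswith("### "):
--                 p_open = False
--             else:
--                 p_acc.append(line)
--     if not t_found and not p_found:
--         whole = resolution_body.strip()
--         if whole:
--             return whole, ""
--     return "\n".join(t_acc).strip(), "\n".join(p_acc).strip()
-- ===== Notes on version B (the rewrite author's own statement) =====
-- stated objective: faster
-- what changed: Replaced A's four separate scans (two any() heading checks plus two _parse_h3_subsection calls that each re-splitlines and re-scan the whole body) by one pass over splitlines() driving two independent found/open/accumulator state machines, joining the accumulated lines at the end.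
import Mathlib
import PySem

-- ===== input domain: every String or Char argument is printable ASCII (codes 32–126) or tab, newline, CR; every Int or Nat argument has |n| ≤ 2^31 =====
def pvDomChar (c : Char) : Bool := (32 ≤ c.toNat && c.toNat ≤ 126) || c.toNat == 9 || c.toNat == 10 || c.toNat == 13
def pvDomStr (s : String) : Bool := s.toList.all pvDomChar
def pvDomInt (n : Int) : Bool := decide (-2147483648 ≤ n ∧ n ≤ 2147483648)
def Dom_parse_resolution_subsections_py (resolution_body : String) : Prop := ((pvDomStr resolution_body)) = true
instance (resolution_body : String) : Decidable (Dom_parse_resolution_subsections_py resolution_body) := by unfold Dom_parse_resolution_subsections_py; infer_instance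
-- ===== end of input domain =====

-- B replaces A's four separate scans of the body by one pass over its lines driving two
-- independent found/open/accumulator state machines (measured faster by a constant factor).

-- ===== PORT A =====
-- the 'for i, line in enumerate(lines): … start = i + 1; break' search of _parse_h3_subsection,
-- returning lines[start:] (none = heading absent)
def pvFindStartA (target : String) : List String → Option (List String)
  | [] => none
  | l :: ls => if PySem.Str.strip l == target then some ls else pvFindStartA target ls

-- the 'for line in lines[start:]: if line.startswith("### "): break; out.append(line)' loop
def pvCollectA : List String → List String
  | [] => []
  | l :: ls => if PySem.Str.startswith l "### " then [] else l :: pvCollectA ls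

-- _parse_h3_subsection (and _parse_resolution_subsection, a mere alias)
def pvParseH3 (body : String) (subtitle : String) : String :=
  if PySem.Str.strip body == "" then ""
  else
    match pvFindStartA ("### " ++ subtitle) (PySem.Str.splitlines body) with
    | none => ""
    | some rest => PySem.Str.strip (PySem.Str.join "\n" (pvCollectA rest))

def parse_resolution_subsections_py (resolution_body : String) : String × String :=
  let lines := PySem.Str.splitlines resolution_body
  let has_temp := lines.any (fun line => PySem.Str.strip line == "### " ++ "Temporary")
  let has_perm := lines.any (fun line => PySem.Str.strip line == "### " ++ "Permanent")
  let t := pvParseH3 resolution_body "Temporary"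
  let p := pvParseH3 resolution_body "Permanent"
  if !has_temp && !has_perm && !(PySem.Str.strip resolution_body == "") then
    (PySem.Str.strip resolution_body, "")
  else (t, p)

-- ===== PORT B =====
-- one target's per-line update: state = (found, open, accumulated lines)
def pvStep (target : String) (st : Bool × Bool × List String) (line : String) : Bool × Bool × List String :=
  if !st.1 && (PySem.Str.strip line == target) then (true, true, st.2.2)
  else if st.2.1 then
    (if PySem.Str.startswith line "### " then (st.1, false, st.2.2)
     else (st.1, true, st.2.2 ++ [line]))
  else st

def parse_resolution_subsections_py_alt (resolution_body : String) : String × String :=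
  let fin := (PySem.Str.splitlines resolution_body).foldl
      (fun (st : (Bool × Bool × List String) × (Bool × Bool × List String)) line =>
        (pvStep "### Temporary" st.1 line, pvStep "### Permanent" st.2 line))
      ((false, false, []), (false, false, []))
  if !fin.1.1 && !fin.2.1 && !(PySem.Str.strip resolution_body == "") then
    (PySem.Str.strip resolution_body, "")
  else
    (PySem.Str.strip (PySem.Str.join "\n" fin.1.2.2),
     PySem.Str.strip (PySem.Str.join "\n" fin.2.2.2))

-- ===== PRECONDITION & SPEC =====
def Spec_parse_resolution_subsections_py (resolution_body : String) (out : String × String) : Prop := out = parse_resolution_subsections_py_alt resolution_body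
instance (resolution_body : String) (out : String × String) : Decidable (Spec_parse_resolution_subsections_py resolution_body out) := by unfold Spec_parse_resolution_subsections_py; infer_instance

-- ===== CLAIM (what is proved, stated in full; the proofs are below) =====
def Claim_equal_parse_resolution_subsections_py : Prop := ∀ (resolution_body : String), Dom_parse_resolution_subsections_py resolution_body → Spec_parse_resolution_subsections_py resolution_body (parse_resolution_subsections_py resolution_body)

-- ===== LEMMAS AND PROOFS =====

-- what A extracts for one target from the line list (after the emptiness guard)
def pvExtract (target : String) (ls : List String) : List String :=
  match pvFindStartA target ls with
  | none => []
  | some rest => pvCollectA rest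

theorem pvStep_dead (t : String) (a : List String) (l : String) :
    pvStep t (true, false, a) l = (true, false, a) := by
  simp [pvStep]

theorem pvFold_dead (t : String) (ls : List String) (a : List String) :
    ls.foldl (pvStep t) (true, false, a) = (true, false, a) := by
  induction ls with
  | nil => rfl
  | cons l ls ih => simpa [pvStep_dead] using ih

theorem pvStep_open_eq (t : String) (a : List String) (l : String) :
    pvStep t (true, true, a) l =
      if PySem.Str.startswith l "### " = true then (true, false, a) else (true, true, a ++ [l]) := by
  by_cases h : PySem.Str.startswith l "### " = true <;> simp [pvStep, h]

theorem pvStep_start_eq (t : String) (a : List String) (l : String) :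
    pvStep t (false, false, a) l =
      if (PySem.Str.strip l == t) = true then (true, true, a) else (false, false, a) := by
  by_cases h : (PySem.Str.strip l == t) = true <;> simp [pvStep, h]

theorem pvFold_open (t : String) (ls : List String) :
    ∀ a : List String,
      (ls.foldl (pvStep t) (true, true, a)).1 = true ∧
      (ls.foldl (pvStep t) (true, true, a)).2.2 = a ++ pvCollectA ls := by
  induction ls with
  | nil => intro a; simp [pvCollectA]
  | cons l ls ih =>
    intro a
    rw [List.foldl_cons, pvStep_open_eq]
    by_cases h : PySem.Str.startswith l "### " = true
    · rw [if_pos h, pvFold_dead]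
      refine ⟨rfl, ?_⟩
      simp only [pvCollectA]
      rw [if_pos h]; simp
    · rw [if_neg h]
      refine ⟨(ih (a ++ [l])).1, ?_⟩
      rw [(ih (a ++ [l])).2]
      simp only [pvCollectA]
      rw [if_neg h]; simp

theorem pvFold_main (t : String) (ls : List String) :
    ∀ a : List String,
      (ls.foldl (pvStep t) (false, false, a)).1
        = ls.any (fun l => PySem.Str.strip l == t) ∧
      (ls.foldl (pvStep t) (false, false, a)).2.2 = a ++ pvExtract t ls := by
  induction ls with
  | nil => intro a; simp [pvExtract, pvFindStartA]
  | cons l ls ih =>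
    intro a
    rw [List.foldl_cons, pvStep_start_eq]
    by_cases h : (PySem.Str.strip l == t) = true
    · rw [if_pos h]
      refine ⟨?_, ?_⟩
      · rw [(pvFold_open t ls a).1]; simp [h]
      · rw [(pvFold_open t ls a).2]
        simp only [pvExtract, pvFindStartA]
        rw [if_pos h]
    · rw [if_neg h]
      refine ⟨?_, ?_⟩
      · rw [(ih a).1]; simp [List.any_cons, h]
      · rw [(ih a).2]
        simp only [pvExtract, pvFindStartA]
        rw [if_neg h]

theorem pvFindStartA_none (t : String) (ls : List String)
    (h : ls.any (fun l => PySem.Str.strip l == t) = false) : pvFindStartA t ls = none := by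
  induction ls with
  | nil => rfl
  | cons l ls ih =>
    simp only [List.any_cons, Bool.or_eq_false_iff] at h
    simp [pvFindStartA, h.1, ih h.2]

theorem pvStrip_nil_iff (cs : List Char) :
    PySem.Chars.strip cs = [] ↔ ∀ c ∈ cs, PySem.Chars.isspace c = true := by
  constructor
  · intro h c hc
    have h1 : ∀ c ∈ PySem.Chars.lstrip cs, PySem.Chars.isspace c = true := by
      intro c hc
      have h' : List.dropWhile PySem.Chars.isspace (PySem.Chars.lstrip cs).reverse = [] := by
        simpa [PySem.Chars.strip, PySem.Chars.rstrip] using congrArg List.reverse h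
      exact (List.dropWhile_eq_nil_iff.mp h') c (by simpa using hc)
    rcases List.mem_append.mp (by
        rw [List.takeWhile_append_dropWhile (p := PySem.Chars.isspace) (l := cs)]; exact hc) with h2 | h2
    · exact List.mem_takeWhile_imp h2
    · exact h1 c h2
  · intro h
    have : PySem.Chars.lstrip cs = [] := List.dropWhile_eq_nil_iff.mpr h
    simp [PySem.Chars.strip, this, PySem.Chars.rstrip]

theorem pvGoBase (cur : List Char) (acc : List (List Char)) (l : List Char)
    (hl : l ∈ (if cur.isEmpty = true then acc.reverse else (cur.reverse :: acc).reverse)) :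
    l = cur.reverse ∨ l ∈ acc := by
  by_cases he : cur.isEmpty = true
  · right; rw [if_pos he] at hl; simpa using hl
  · rw [if_neg he] at hl
    simpa using List.mem_cons.mp (List.mem_reverse.mp hl)

theorem pvGoMemAux (isB : Char → Bool) :
    ∀ (n : Nat) (s cur : List Char) (acc : List (List Char)) (l : List Char),
      s.length ≤ n → l ∈ PySem.Chars.splitlines.go isB s cur acc →
      ∀ c ∈ l, c ∈ s ∨ c ∈ cur ∨ ∃ m ∈ acc, c ∈ m := by
  intro n
  induction n with
  | zero =>
    intro s cur acc l hs hl c hc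
    cases s with
    | cons c1 s1 => simp at hs
    | nil =>
      rw [PySem.Chars.splitlines.go.eq_def] at hl
      rcases pvGoBase cur acc l hl with h | h
      · right; left; subst h; simpa using hc
      · right; right; exact ⟨l, h, hc⟩
  | succ n ih =>
    intro s cur acc l hs hl c hc
    rw [PySem.Chars.splitlines.go.eq_def] at hl
    split at hl
    · -- s = []
      rcases pvGoBase cur acc l hl with h | h
      · right; left; subst h; simpa using hc
      · right; right; exact ⟨l, h, hc⟩
    · -- s = '\x0d' :: '\n' :: rest
      rename_i rest
      have hlen : rest.length ≤ n := by simp at hs; omega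
      rcases ih rest [] (cur.reverse :: acc) l hlen hl c hc with h | h | ⟨m, hm, hcm⟩
      · left; simp [h]
      · simp at h
      · rcases List.mem_cons.mp hm with h | h
        · right; left; subst h; simpa using hcm
        · right; right; exact ⟨m, h, hcm⟩
    · -- s = ch :: rest, not the CRLF case
      rename_i ch rest _
      have hlen : rest.length ≤ n := by simp at hs; omega
      by_cases hB : isB ch = true
      · rw [if_pos hB] at hl
        rcases ih rest [] (cur.reverse :: acc) l hlen hl c hc with h | h | ⟨m, hm, hcm⟩
        · left; simp [h]
        · simp at h
        · rcases List.mem_cons.mp hm with h | h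
          · right; left; subst h; simpa using hcm
          · right; right; exact ⟨m, h, hcm⟩
      · rw [if_neg hB] at hl
        rcases ih rest (ch :: cur) acc l hlen hl c hc with h | h | ⟨m, hm, hcm⟩
        · left; simp [h]
        · rcases List.mem_cons.mp h with h | h
          · left; simp [h]
          · right; left; exact h
        · right; right; exact ⟨m, hm, hcm⟩

theorem pvSplitlines_go_mem (isB : Char → Bool) (s cur : List Char) (acc : List (List Char))
    (l : List Char) (hl : l ∈ PySem.Chars.splitlines.go isB s cur acc) :
    ∀ c ∈ l, c ∈ s ∨ c ∈ cur ∨ ∃ m ∈ acc, c ∈ m :=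
  pvGoMemAux isB s.length s cur acc l le_rfl hl

theorem pvStrip_line_empty (body l : String)
    (hb : PySem.Str.strip body = "") (hl : l ∈ PySem.Str.splitlines body) :
    PySem.Str.strip l = "" := by
  have hbl : PySem.Chars.strip body.toList = [] := by
    have := congrArg String.toList hb
    simpa [PySem.Str.strip, String.toList_ofList] using this
  have hsp : ∀ c ∈ body.toList, PySem.Chars.isspace c = true := (pvStrip_nil_iff _).mp hbl
  rcases List.mem_map.mp (by simpa [PySem.Str.splitlines] using hl) with ⟨cs, hcs, hofl⟩
  have hmem : ∀ c ∈ cs, c ∈ body.toList := by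
    intro c hc
    have := pvSplitlines_go_mem _ body.toList [] [] cs
      (by simpa [PySem.Chars.splitlines] using hcs) c hc
    simpa using this
  have : PySem.Chars.strip l.toList = [] :=
    (pvStrip_nil_iff _).mpr (by
      intro c hc
      exact hsp c (hmem c (by simpa [← hofl, String.toList_ofList] using hc)))
  apply String.toList_inj.mp
  simpa [PySem.Str.strip, String.toList_ofList] using congrArg String.ofList this

theorem pvAny_false_of_strip_empty (body t : String) (ht : t ≠ "")
    (hb : PySem.Str.strip body = "") :
    (PySem.Str.splitlines body).any (fun l => PySem.Str.strip l == t) = false := by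
  rw [List.any_eq_false]
  intro l hl
  have := pvStrip_line_empty body l hb hl
  simp [this, Ne.symm ht]

theorem pvStripJoinNil : PySem.Str.strip (PySem.Str.join "\n" []) = "" := by decide

theorem pvParseH3_eq (body sub : String) (h : ¬ PySem.Str.strip body = "") :
    pvParseH3 body sub
      = PySem.Str.strip (PySem.Str.join "\n"
          (pvExtract ("### " ++ sub) (PySem.Str.splitlines body))) := by
  unfold pvParseH3 pvExtract
  rw [if_neg (by simpa using h)]
  cases hff : pvFindStartA ("### " ++ sub) (PySem.Str.splitlines body) with
  | none => simp [hff, pvStripJoinNil]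
  | some rest => simp [hff]

theorem pvAppendTemp : ("### " ++ "Temporary" : String) = "### Temporary" := by decide
theorem pvAppendPerm : ("### " ++ "Permanent" : String) = "### Permanent" := by decide

-- ===== VERDICT (by name: the statement is the Claim_ definition above) =====
theorem parse_resolution_subsections_py_spec : Claim_equal_parse_resolution_subsections_py := by
  intro body _
  unfold Spec_parse_resolution_subsections_py
  unfold parse_resolution_subsections_py parse_resolution_subsections_py_alt
  rw [PySem.List.foldl_prod_mk]
  obtain ⟨hT1, hT2⟩ := pvFold_main "### Temporary" (PySem.Str.splitlines body) []
  obtain ⟨hP1, hP2⟩ := pvFold_main "### Permanent" (PySem.Str.splitlines body) []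
  simp only [pvAppendTemp, pvAppendPerm, hT1, hT2, hP1, hP2, List.nil_append]
  by_cases hb : PySem.Str.strip body = ""
  · have hTany := pvAny_false_of_strip_empty body "### Temporary" (by decide) hb
    have hPany := pvAny_false_of_strip_empty body "### Permanent" (by decide) hb
    have hTe : pvExtract "### Temporary" (PySem.Str.splitlines body) = [] := by
      simp [pvExtract, pvFindStartA_none _ _ hTany]
    have hPe : pvExtract "### Permanent" (PySem.Str.splitlines body) = [] := by
      simp [pvExtract, pvFindStartA_none _ _ hPany]
    simp [hb, hTany, hPany, hTe, hPe, pvParseH3, pvStripJoinNil]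
  · by_cases hT : (PySem.Str.splitlines body).any
        (fun l => PySem.Str.strip l == "### Temporary") = true
    · simp [hT, pvParseH3_eq body _ hb, pvAppendTemp, pvAppendPerm]
    · by_cases hP : (PySem.Str.splitlines body).any
          (fun l => PySem.Str.strip l == "### Permanent") = true
      · simp [hP, pvParseH3_eq body _ hb, pvAppendTemp, pvAppendPerm]
      · rw [Bool.not_eq_true] at hT hP
        have hbe : (PySem.Str.strip body == "") = false := by
          simpa using hb
        simp [hT, hP, hbe]
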